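-- pv_equiv track=rewrite | github.com/pradrx/aoc | 2024/14.py | tree_line_check
-- ===== SOURCE A (Python) =====
-- def tree_line_check(pos_set):
--
--     for x, y in pos_set:
--         for i in range(1, 7):
--             if (x + i, y) not in pos_set:
--                 break
--         else:
--             return True
--     return False
-- ===== SOURCE B (Python) =====
-- def tree_line_check(pos_set):
--     # shift-and-intersect: cur after round i = points that start a run of length i+1
--     s = set(pos_set)
--     cur = s
--     for i in range(1, 7):
--         cur = {(x, y) for (x, y) in cur if (x + i, y) in s}
--     return len(cur) > 0
-- ===== Notes on version B (the rewrite author's own statement) =====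
-- stated objective: alternative
-- what changed: Replaces A's per-point probing of 6 successors via linear list membership with a hash set and 6 rounds of shift-and-intersect filtering (cur_i = the points that start a run of length i+1), answering whether the final set is nonempty.
import Mathlib
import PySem

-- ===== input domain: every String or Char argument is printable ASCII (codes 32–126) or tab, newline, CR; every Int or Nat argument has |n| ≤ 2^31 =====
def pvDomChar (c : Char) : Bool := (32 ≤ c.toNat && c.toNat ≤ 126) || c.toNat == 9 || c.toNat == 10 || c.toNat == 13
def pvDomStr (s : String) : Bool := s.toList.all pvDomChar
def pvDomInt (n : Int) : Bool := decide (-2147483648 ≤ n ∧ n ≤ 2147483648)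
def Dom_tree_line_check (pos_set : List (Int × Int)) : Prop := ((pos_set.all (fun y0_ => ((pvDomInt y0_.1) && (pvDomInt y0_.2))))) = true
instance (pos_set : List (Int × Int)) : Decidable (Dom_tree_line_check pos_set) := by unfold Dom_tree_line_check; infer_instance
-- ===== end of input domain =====

-- B replaces per-point successor probing (linear list membership) by a set and 6 rounds of
-- shift-and-intersect filtering; return value only, no mutation involved.

-- ===== PORT A =====
-- inner 'for i in range(1,7): … break / else' : true iff no break fired
def tlcInner (pos_set : List (Int × Int)) (x y : Int) : List Int → Bool
  | [] => true
  | i :: rest =>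
      if !(pos_set.contains (x + i, y)) then false
      else tlcInner pos_set x y rest

-- outer 'for x, y in pos_set: …' with early return True
def tlcOuter (full : List (Int × Int)) : List (Int × Int) → Bool
  | [] => false
  | (x, y) :: rest =>
      if tlcInner full x y (PySem.List.pyRange 1 7 1) then true
      else tlcOuter full rest

def tree_line_check (pos_set : List (Int × Int)) : Bool :=
  tlcOuter pos_set pos_set

-- ===== PORT B =====
def tree_line_check_alt (pos_set : List (Int × Int)) : Bool :=
  let s : PySem.Set (Int × Int) := PySem.Set.ofList pos_set
  let cur : PySem.Set (Int × Int) :=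
    (PySem.List.pyRange 1 7 1).foldl
      (fun cur i =>
        PySem.Set.ofList (cur.filter (fun p => PySem.Set.contains s (p.1 + i, p.2))))
      s
  decide (0 < PySem.Set.len cur)

-- ===== PRECONDITION & SPEC =====
def Spec_tree_line_check (pos_set : List (Int × Int)) (out : Bool) : Prop := out = tree_line_check_alt pos_set
instance (pos_set : List (Int × Int)) (out : Bool) : Decidable (Spec_tree_line_check pos_set out) := by unfold Spec_tree_line_check; infer_instance

-- ===== CLAIM (what is proved, stated in full; the proofs are below) =====
def Claim_equal_tree_line_check : Prop := ∀ (pos_set : List (Int × Int)), Dom_tree_line_check pos_set → Spec_tree_line_check pos_set (tree_line_check pos_set)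

-- ===== LEMMAS AND PROOFS =====

theorem tlcInner_eq_all (s : List (Int × Int)) (x y : Int) (l : List Int) :
    tlcInner s x y l = l.all (fun i => s.contains (x + i, y)) := by
  induction l with
  | nil => rfl
  | cons i rest ih =>
      simp only [tlcInner, List.all_cons, ih]
      cases h : s.contains (x + i, y) <;> simp

theorem tlcOuter_eq_any (full : List (Int × Int)) (l : List (Int × Int)) :
    tlcOuter full l = l.any (fun p => tlcInner full p.1 p.2 (PySem.List.pyRange 1 7 1)) := by
  induction l with
  | nil => rfl
  | cons p rest ih =>
      obtain ⟨x, y⟩ := p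
      simp only [tlcOuter, List.any_cons, ih]
      cases h : tlcInner full x y (PySem.List.pyRange 1 7 1) <;> simp

-- invariant of the six filtering rounds
theorem foldl_filter_eq (s : List (Int × Int)) (l : List Int) (cur : List (Int × Int))
    (hnd : cur.Nodup) :
    l.foldl (fun cur i =>
        PySem.Set.ofList (cur.filter (fun p => PySem.Set.contains s (p.1 + i, p.2)))) cur
      = cur.filter (fun p => l.all (fun i => PySem.Set.contains s (p.1 + i, p.2))) := by
  induction l generalizing cur with
  | nil => simp
  | cons i rest ih =>
      simp only [List.foldl_cons]
      rw [PySem.Set.ofList_eq_self_of_nodup _ (hnd.filter _),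
        ih _ (hnd.filter _), List.filter_filter]
      apply List.filter_congr
      intro p _
      simp [List.all_cons, Bool.and_comm]

theorem tree_line_check_eq_any (pos_set : List (Int × Int)) :
    tree_line_check pos_set
      = pos_set.any (fun p =>
          (PySem.List.pyRange 1 7 1).all (fun i => pos_set.contains (p.1 + i, p.2))) := by
  unfold tree_line_check
  rw [tlcOuter_eq_any]
  simp only [tlcInner_eq_all]

-- ===== VERDICT (by name: the statement is the Claim_ definition above) =====
theorem tree_line_check_spec : Claim_equal_tree_line_check := by
  intro pos_set _
  unfold Spec_tree_line_check tree_line_check_alt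
  show tree_line_check pos_set
      = decide (0 < PySem.Set.len ((PySem.List.pyRange 1 7 1).foldl
          (fun cur i => PySem.Set.ofList (cur.filter
            (fun p => PySem.Set.contains (PySem.Set.ofList pos_set) (p.1 + i, p.2))))
          (PySem.Set.ofList pos_set)))
  rw [tree_line_check_eq_any,
    foldl_filter_eq (PySem.Set.ofList pos_set) _ _ (PySem.Set.nodup_ofList pos_set),
    Bool.eq_iff_iff]
  simp only [List.any_eq_true, List.all_eq_true, decide_eq_true_eq, PySem.Set.len,
    List.mem_filter, PySem.Set.mem_ofList, List.contains_iff_mem, PySem.Set.contains_iff,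
    Int.natCast_pos, List.length_pos_iff_exists_mem]
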